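-- pv_equiv track=rewrite | github.com/muhmi/c64-anim-tool | src/animation_converter/color_data_utils.py | generate_color_fill_code
-- ===== SOURCE A (Python) =====
-- def generate_color_fill_code(
--     fill_blocks, min_sequence_length=10, max_sequence_length=120, base_address=0xD800
-- ):
--     def find_sequences(numbers):
--         sequences = []
--         current_seq = []
--         for i, num in enumerate(numbers):
--             if not current_seq:
--                 current_seq = [num]
--             elif num == current_seq[-1] + 1:
--                 # Check if adding this number would exceed max length
--                 if len(current_seq) < max_sequence_length:
--                     current_seq.append(num)
--                 else:
--                     # Current sequence has reached max length, store it and start new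
--                     if len(current_seq) >= min_sequence_length:
--                         sequences.append(current_seq)
--                     current_seq = [num]
--             else:
--                 if len(current_seq) >= min_sequence_length:
--                     sequences.append(current_seq)
--                 current_seq = [num]
--         if current_seq and len(current_seq) >= min_sequence_length:
--             sequences.append(current_seq)
--         return sequences
--
--     def remove_sequences_from_list(numbers, sequences):
--         flat_seq = [num for seq in sequences for num in seq]
--         return [num for num in numbers if num not in flat_seq]
--
--     def group_sequences_by_length(sequences):
--         length_groups = {}
--         for seq in sequences:
--             length = len(seq)
--             if length not in length_groups:
--                 length_groups[length] = []
--             length_groups[length].append(seq)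
--         return length_groups
--
--     result = []
--     for idx, offsets in enumerate(fill_blocks):
--         result.append(f"fill_color_step{idx}")
--         result.append("\tlda fill_color")
--
--         # Find continuous sequences
--         sequences = find_sequences(offsets)
--
--         # Group sequences by length and sort by length (descending)
--         length_groups = group_sequences_by_length(sequences)
--         sorted_lengths = sorted(length_groups.keys(), reverse=True)
--
--         # Generate optimized fill code for each length group
--         for length in sorted_lengths:
--             sequences_of_length = length_groups[length]
--             result.append(f"\tldx #{length} - 1")
--             result.append("-")
--             # Generate a loop for each sequence of this length
--             loop_label = f"l{length}_{idx}"
--             for sequence in sequences_of_length: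
--                 start_offset = sequence[0]
--                 result.append(f"\tsta ${hex(base_address + start_offset)[2:]},x")
--
--             result.append("\tdex")
--             result.append("\tbpl -")
--             result.append("")
--
--         # Generate individual sta instructions for remaining offsets
--         remaining = remove_sequences_from_list(offsets, sequences)
--         for offset in remaining:
--             result.append(f"\tsta ${hex(base_address + offset)[2:]}")
--
--         result.append("\trts")
--         result.append("")
--
--     return "\n".join(result)
-- ===== SOURCE B (Python) =====
-- def generate_color_fill_code(
--     fill_blocks, min_sequence_length=10, max_sequence_length=120, base_address=0xD800
-- ):
--     out = []
--     for idx, offsets in enumerate(fill_blocks):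
--         out.append(f"fill_color_step{idx}")
--         out.append("\tlda fill_color")
--
--         # One pass: collect kept runs as (start, length) pairs, capping at
--         # max_sequence_length; no per-run lists are materialised.
--         runs = []
--         cur = None  # (start, length) of the run in progress
--         for num in offsets:
--             if cur is not None and num == cur[0] + cur[1] and cur[1] < max_sequence_length:
--                 cur = (cur[0], cur[1] + 1)
--             else:
--                 if cur is not None and min_sequence_length <= cur[1]:
--                     runs.append(cur)
--                 cur = (num, 1)
--         if cur is not None and min_sequence_length <= cur[1]:
--             runs.append(cur)
--
--         # Stable sort by length, longest first; emit in a single pass,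
--         # opening/closing a loop whenever the length changes.
--         ordered = sorted(runs, key=lambda r: r[1], reverse=True)
--         prev = None
--         for s, l in ordered:
--             if prev != l:
--                 if prev is not None:
--                     out.append("\tdex")
--                     out.append("\tbpl -")
--                     out.append("")
--                 out.append(f"\tldx #{l} - 1")
--                 out.append("-")
--                 prev = l
--             out.append(f"\tsta ${hex(base_address + s)[2:]},x")
--         if prev is not None:
--             out.append("\tdex")
--             out.append("\tbpl -")
--             out.append("")
--
--         # Individual stores for offsets not covered by any kept run.
--         for num in offsets:
--             if not any(s <= num < s + l for s, l in runs):
--                 out.append(f"\tsta ${hex(base_address + num)[2:]}")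
--
--         out.append("\trts")
--         out.append("")
--
--     return "\n".join(out)
-- ===== Notes on version B (the rewrite author's own statement) =====
-- stated objective: simpler
-- what changed: B replaces A's per-run list building, dict-of-lengths grouping and descending key sort by a single scan that collects (start,length) pairs, one stable sort of the runs by length descending, and a single emission pass that tracks the previous length; leftover offsets are found by interval tests instead of membership in a flattened list.
import Mathlib
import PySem

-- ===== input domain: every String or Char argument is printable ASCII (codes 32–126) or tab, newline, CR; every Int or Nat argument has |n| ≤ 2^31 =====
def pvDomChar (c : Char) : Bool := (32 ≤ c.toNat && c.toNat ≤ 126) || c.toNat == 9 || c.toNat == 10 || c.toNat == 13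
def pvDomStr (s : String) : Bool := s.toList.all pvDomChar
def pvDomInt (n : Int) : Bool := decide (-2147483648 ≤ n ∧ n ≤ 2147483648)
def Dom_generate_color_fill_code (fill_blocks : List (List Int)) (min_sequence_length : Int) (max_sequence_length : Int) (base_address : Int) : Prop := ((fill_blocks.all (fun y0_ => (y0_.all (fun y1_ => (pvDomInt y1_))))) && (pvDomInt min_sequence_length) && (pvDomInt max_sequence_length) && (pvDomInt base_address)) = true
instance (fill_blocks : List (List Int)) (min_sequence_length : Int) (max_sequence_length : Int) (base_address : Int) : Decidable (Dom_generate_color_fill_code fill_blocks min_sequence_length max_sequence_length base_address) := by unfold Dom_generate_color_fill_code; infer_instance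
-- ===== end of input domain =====

-- B replaces A's per-run list building, dict-of-lengths grouping and key sort by a
-- (start,length) run scan, one stable sort of the runs by length (descending) and a single
-- emission pass tracking the previous length; same return value (objective: simpler).

-- hex(v)[2:] — Python hex is '0x…' / '-0x…' with lowercase digits (Nat.toDigits 16 is
-- lowercase); dropping the first two characters. Used by both Pythons, kept as one helper.
def pyHexTail (n : Int) : String :=
  if n < 0 then String.ofList ('x' :: Nat.toDigits 16 (-n).toNat)
  else String.ofList (Nat.toDigits 16 n.toNat)

-- ===== PORT A =====

-- body of find_sequences' for-loop (state: (sequences, current_seq)); current_seq[-1] is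
-- read only when current_seq is nonempty, so the .getD 0 default is never used
def pvA_findStep (minL maxL : Int) (acc : List (List Int) × List Int) (num : Int) :
    List (List Int) × List Int :=
  let seqs := acc.1
  let cur := acc.2
  if cur = [] then (seqs, [num])
  else if num = cur.getLast?.getD 0 + 1 then
    if (cur.length : Int) < maxL then (seqs, cur ++ [num])
    else if minL ≤ (cur.length : Int) then (seqs ++ [cur], [num]) else (seqs, [num])
  else if minL ≤ (cur.length : Int) then (seqs ++ [cur], [num]) else (seqs, [num])

def pvA_findSequences (minL maxL : Int) (numbers : List Int) : List (List Int) :=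
  let p := numbers.foldl (pvA_findStep minL maxL) ([], [])
  if p.2 ≠ [] ∧ minL ≤ (p.2.length : Int) then p.1 ++ [p.2] else p.1

def pvA_remove (numbers : List Int) (seqs : List (List Int)) : List Int :=
  let flat := seqs.flatMap (fun s => s)
  numbers.filter (fun n => !(flat.contains n))

-- group_sequences_by_length's loop body ('if length not in …: … = []' then append)
def pvA_groupStep (d : PySem.Dict Int (List (List Int))) (seq : List Int) :
    PySem.Dict Int (List (List Int)) :=
  let length : Int := seq.length
  let d := if d.contains length then d else d.insert length []
  d.insert length (d.getD length [] ++ [seq])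

-- sequence[0]: sequences produced by find_sequences are nonempty, the default is never used
def pvA_sta (base : Int) (seq : List Int) : String :=
  "\tsta $" ++ pyHexTail (base + PySem.List.pyGetD seq 0 0) ++ ",x"

def pvA_block (minL maxL base : Int) (idx : Int) (offsets : List Int) (res : List String) :
    List String :=
  let res := res ++ ["fill_color_step" ++ PySem.Int.toStr idx] ++ ["\tlda fill_color"]
  let sequences := pvA_findSequences minL maxL offsets
  let groups := sequences.foldl pvA_groupStep PySem.Dict.empty
  let sortedLengths := PySem.List.sorted groups.keys (fun x => x) true
  let res := sortedLengths.foldl (fun res length =>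
      let res := res ++ ["\tldx #" ++ PySem.Int.toStr length ++ " - 1"] ++ ["-"]
      let res := (groups.getD length []).foldl (fun res seq => res ++ [pvA_sta base seq]) res
      res ++ ["\tdex"] ++ ["\tbpl -"] ++ [""]) res
  let remaining := pvA_remove offsets sequences
  let res := remaining.foldl (fun res offset =>
      res ++ ["\tsta $" ++ pyHexTail (base + offset)]) res
  res ++ ["\trts"] ++ [""]

def generate_color_fill_code (fill_blocks : List (List Int)) (min_sequence_length : Int)
    (max_sequence_length : Int) (base_address : Int) : String :=
  let result := (PySem.List.enumerate fill_blocks 0).foldl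
    (fun res p => pvA_block min_sequence_length max_sequence_length base_address p.1 p.2 res) []
  PySem.Str.join "\n" result

-- ===== PORT B =====

-- body of B's run-scanning loop (state: (runs, cur) with cur = none or some (start, length))
def pvB_scanStep (minL maxL : Int) (acc : List (Int × Int) × Option (Int × Int)) (num : Int) :
    List (Int × Int) × Option (Int × Int) :=
  match acc.2 with
  | some c =>
    if num = c.1 + c.2 ∧ c.2 < maxL then (acc.1, some (c.1, c.2 + 1))
    else ((if minL ≤ c.2 then acc.1 ++ [c] else acc.1), some (num, 1))
  | none => (acc.1, some (num, 1))

def pvB_runs (minL maxL : Int) (offsets : List Int) : List (Int × Int) :=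
  let p := offsets.foldl (pvB_scanStep minL maxL) ([], none)
  match p.2 with
  | some c => if minL ≤ c.2 then p.1 ++ [c] else p.1
  | none => p.1

-- body of B's single emission pass (state: (out, prev))
def pvB_emitStep (base : Int) (acc : List String × Option Int) (r : Int × Int) :
    List String × Option Int :=
  let s := acc.2
  if s ≠ some r.2 then
    ((if s.isSome then acc.1 ++ ["\tdex"] ++ ["\tbpl -"] ++ [""] else acc.1)
       ++ ["\tldx #" ++ PySem.Int.toStr r.2 ++ " - 1"] ++ ["-"]
       ++ ["\tsta $" ++ pyHexTail (base + r.1) ++ ",x"], some r.2)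
  else (acc.1 ++ ["\tsta $" ++ pyHexTail (base + r.1) ++ ",x"], s)

def pvB_block (minL maxL base : Int) (idx : Int) (offsets : List Int) (out : List String) :
    List String :=
  let out := out ++ ["fill_color_step" ++ PySem.Int.toStr idx] ++ ["\tlda fill_color"]
  let runs := pvB_runs minL maxL offsets
  let ordered := PySem.List.sorted runs (fun r => r.2) true
  let p := ordered.foldl (pvB_emitStep base) (out, none)
  let out := match p.2 with
    | some _ => p.1 ++ ["\tdex"] ++ ["\tbpl -"] ++ [""]
    | none => p.1
  let out := offsets.foldl (fun out num =>
      if !(runs.any (fun r => decide (r.1 ≤ num ∧ num < r.1 + r.2))) then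
        out ++ ["\tsta $" ++ pyHexTail (base + num)]
      else out) out
  out ++ ["\trts"] ++ [""]

def generate_color_fill_code_alt (fill_blocks : List (List Int)) (min_sequence_length : Int)
    (max_sequence_length : Int) (base_address : Int) : String :=
  let out := (PySem.List.enumerate fill_blocks 0).foldl
    (fun out p => pvB_block min_sequence_length max_sequence_length base_address p.1 p.2 out) []
  PySem.Str.join "\n" out

-- ===== PRECONDITION & SPEC =====
def Spec_generate_color_fill_code (fill_blocks : List (List Int)) (min_sequence_length : Int) (max_sequence_length : Int) (base_address : Int) (out : String) : Prop := out = generate_color_fill_code_alt fill_blocks min_sequence_length max_sequence_length base_address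
instance (fill_blocks : List (List Int)) (min_sequence_length : Int) (max_sequence_length : Int) (base_address : Int) (out : String) : Decidable (Spec_generate_color_fill_code fill_blocks min_sequence_length max_sequence_length base_address out) := by unfold Spec_generate_color_fill_code; infer_instance

-- ===== CLAIM (what is proved, stated in full; the proofs are below) =====
def Claim_equal_generate_color_fill_code : Prop := ∀ (fill_blocks : List (List Int)) (min_sequence_length : Int) (max_sequence_length : Int) (base_address : Int), Dom_generate_color_fill_code fill_blocks min_sequence_length max_sequence_length base_address → Spec_generate_color_fill_code fill_blocks min_sequence_length max_sequence_length base_address (generate_color_fill_code fill_blocks min_sequence_length max_sequence_length base_address)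

-- ===== LEMMAS AND PROOFS =====

-- the interval a run (s, l) denotes: the consecutive numbers s, s+1, …, s+l-1
def pvRng (r : Int × Int) : List Int := PySem.List.pyRange r.1 (r.1 + r.2) 1

theorem pvRng_singleton (n : Int) : pvRng (n, 1) = [n] := by
  simp [pvRng, PySem.List.pyRange_one_singleton]

theorem pvRng_snoc (s l : Int) (h : 1 ≤ l) : pvRng (s, l) ++ [s + l] = pvRng (s, l + 1) := by
  unfold pvRng
  rw [show s + (l + 1) = (s + l) + 1 by ring, PySem.List.pyRange_one_succ_right (by omega)]

theorem pvRng_length (s l : Int) (h : 1 ≤ l) : ((pvRng (s, l)).length : Int) = l := by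
  unfold pvRng
  rw [PySem.List.length_pyRange_one]
  omega

theorem pvRng_ne_nil (s l : Int) (h : 1 ≤ l) : pvRng (s, l) ≠ [] := by
  intro hc
  have := pvRng_length s l h
  rw [hc] at this
  simp at this; omega

theorem pvRng_getLast (s l : Int) (h : 1 ≤ l) :
    (pvRng (s, l)).getLast?.getD 0 = s + l - 1 := by
  unfold pvRng
  rw [show s + l = (s + l - 1) + 1 by ring, PySem.List.pyRange_one_succ_right (by omega)]
  simp

theorem pvRng_head (s l : Int) (h : 1 ≤ l) : PySem.List.pyGetD (pvRng (s, l)) 0 0 = s := by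
  unfold pvRng
  rw [PySem.List.pyRange_one_cons (by omega)]
  simp [PySem.List.pyGetD]

-- relation between A's find_sequences state and B's scan state
def pvStateRel (a : List (List Int) × List Int) (b : List (Int × Int) × Option (Int × Int)) :
    Prop :=
  a.1 = b.1.map pvRng ∧ (∀ r ∈ b.1, 1 ≤ r.2) ∧
    ((a.2 = [] ∧ b.2 = none) ∨ (∃ c, b.2 = some c ∧ 1 ≤ c.2 ∧ a.2 = pvRng c))

theorem pvStep_rel (minL maxL : Int) (a : List (List Int) × List Int)
    (b : List (Int × Int) × Option (Int × Int)) (num : Int) (h : pvStateRel a b) :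
    pvStateRel (pvA_findStep minL maxL a num) (pvB_scanStep minL maxL b num) := by
  obtain ⟨h1, h2, h3⟩ := h
  rcases h3 with ⟨ha2, hb2⟩ | ⟨c, hb2, hc, ha2⟩
  · have ea : pvA_findStep minL maxL a num = (a.1, [num]) := by simp [pvA_findStep, ha2]
    have eb : pvB_scanStep minL maxL b num = (b.1, some (num, 1)) := by
      simp [pvB_scanStep, hb2]
    rw [ea, eb]
    exact ⟨h1, h2, Or.inr ⟨(num, 1), rfl, le_refl 1, (pvRng_singleton num).symm⟩⟩
  · obtain ⟨s, l⟩ := c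
    simp only at hc ha2
    have hne : a.2 ≠ [] := by rw [ha2]; exact pvRng_ne_nil s l hc
    have hlast : a.2.getLast?.getD 0 = s + l - 1 := by rw [ha2]; exact pvRng_getLast s l hc
    have hlen : (a.2.length : Int) = l := by rw [ha2]; exact pvRng_length s l hc
    have hrel1 : a.1 ++ [a.2] = (b.1 ++ [(s, l)]).map pvRng := by simp [h1, ha2]
    have hkeep : ∀ r ∈ b.1 ++ [(s, l)], 1 ≤ r.2 := by
      intro r hr
      rcases List.mem_append.1 hr with hh | hh
      · exact h2 r hh
      · simp only [List.mem_singleton] at hh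
        rw [hh]; exact hc
    by_cases hnum : num = s + l
    · by_cases hlt : l < maxL
      · have ea : pvA_findStep minL maxL a num = (a.1, a.2 ++ [num]) := by
          unfold pvA_findStep
          rw [if_neg hne, hlast, if_pos (by omega : num = s + l - 1 + 1), hlen, if_pos hlt]
        have eb : pvB_scanStep minL maxL b num = (b.1, some (s, l + 1)) := by
          simp [pvB_scanStep, hb2, hnum, hlt]
        rw [ea, eb]
        refine ⟨h1, h2, Or.inr ⟨(s, l + 1), rfl, by omega, ?_⟩⟩
        rw [ha2, hnum]
        exact (pvRng_snoc s l hc).symm ▸ rfl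
      · by_cases hmin : minL ≤ l
        · have ea : pvA_findStep minL maxL a num = (a.1 ++ [a.2], [num]) := by
            unfold pvA_findStep
            rw [if_neg hne, hlast, if_pos (by omega : num = s + l - 1 + 1), hlen,
              if_neg hlt, if_pos hmin]
          have eb : pvB_scanStep minL maxL b num = (b.1 ++ [(s, l)], some (num, 1)) := by
            simp [pvB_scanStep, hb2, hlt, hmin]
          rw [ea, eb]
          exact ⟨hrel1, hkeep, Or.inr ⟨(num, 1), rfl, le_refl 1, (pvRng_singleton num).symm⟩⟩
        · have ea : pvA_findStep minL maxL a num = (a.1, [num]) := by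
            unfold pvA_findStep
            rw [if_neg hne, hlast, if_pos (by omega : num = s + l - 1 + 1), hlen,
              if_neg hlt, if_neg hmin]
          have eb : pvB_scanStep minL maxL b num = (b.1, some (num, 1)) := by
            simp [pvB_scanStep, hb2, hlt, hmin]
          rw [ea, eb]
          exact ⟨h1, h2, Or.inr ⟨(num, 1), rfl, le_refl 1, (pvRng_singleton num).symm⟩⟩
    · by_cases hmin : minL ≤ l
      · have ea : pvA_findStep minL maxL a num = (a.1 ++ [a.2], [num]) := by
          unfold pvA_findStep
          rw [if_neg hne, hlast, if_neg (by omega : ¬num = s + l - 1 + 1), hlen, if_pos hmin]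
        have eb : pvB_scanStep minL maxL b num = (b.1 ++ [(s, l)], some (num, 1)) := by
          simp [pvB_scanStep, hb2, hnum, hmin]
        rw [ea, eb]
        exact ⟨hrel1, hkeep, Or.inr ⟨(num, 1), rfl, le_refl 1, (pvRng_singleton num).symm⟩⟩
      · have ea : pvA_findStep minL maxL a num = (a.1, [num]) := by
          unfold pvA_findStep
          rw [if_neg hne, hlast, if_neg (by omega : ¬num = s + l - 1 + 1), hlen, if_neg hmin]
        have eb : pvB_scanStep minL maxL b num = (b.1, some (num, 1)) := by
          simp [pvB_scanStep, hb2, hnum, hmin]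
        rw [ea, eb]
        exact ⟨h1, h2, Or.inr ⟨(num, 1), rfl, le_refl 1, (pvRng_singleton num).symm⟩⟩

theorem pvFold_rel (minL maxL : Int) (nums : List Int) (a : List (List Int) × List Int)
    (b : List (Int × Int) × Option (Int × Int)) (h : pvStateRel a b) :
    pvStateRel (nums.foldl (pvA_findStep minL maxL) a) (nums.foldl (pvB_scanStep minL maxL) b) := by
  induction nums generalizing a b with
  | nil => exact h
  | cons x t ih => exact ih _ _ (pvStep_rel minL maxL a b x h)

-- A's sequences are exactly B's runs rendered as intervals, and every run length is ≥ 1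
theorem pvSequences_eq (minL maxL : Int) (offsets : List Int) :
    pvA_findSequences minL maxL offsets = (pvB_runs minL maxL offsets).map pvRng
      ∧ ∀ r ∈ pvB_runs minL maxL offsets, 1 ≤ r.2 := by
  have h := pvFold_rel minL maxL offsets ([], []) ([], none) ⟨rfl, by simp, Or.inl ⟨rfl, rfl⟩⟩
  obtain ⟨h1, h2, h3⟩ := h
  rcases h3 with ⟨ha2, hb2⟩ | ⟨c, hb2, hc, ha2⟩
  · have ea : pvA_findSequences minL maxL offsets
        = (offsets.foldl (pvA_findStep minL maxL) ([], [])).1 := by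
      simp [pvA_findSequences, ha2]
    have eb : pvB_runs minL maxL offsets
        = (offsets.foldl (pvB_scanStep minL maxL) ([], none)).1 := by
      simp [pvB_runs, hb2]
    rw [ea, eb]; exact ⟨h1, h2⟩
  · obtain ⟨s, l⟩ := c
    simp only at hc ha2
    have hne := pvRng_ne_nil s l hc
    have hlen := pvRng_length s l hc
    by_cases hmin : minL ≤ l
    · have ea : pvA_findSequences minL maxL offsets
          = (offsets.foldl (pvA_findStep minL maxL) ([], [])).1 ++ [pvRng (s, l)] := by
        simp [pvA_findSequences, ha2, hne, hlen, hmin]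
      have eb : pvB_runs minL maxL offsets
          = (offsets.foldl (pvB_scanStep minL maxL) ([], none)).1 ++ [(s, l)] := by
        simp [pvB_runs, hb2, hmin]
      rw [ea, eb]
      constructor
      · simp [h1]
      · intro r hr
        rcases List.mem_append.1 hr with hh | hh
        · exact h2 r hh
        · simp only [List.mem_singleton] at hh
          rw [hh]; exact hc
    · have ea : pvA_findSequences minL maxL offsets
          = (offsets.foldl (pvA_findStep minL maxL) ([], [])).1 := by
        simp [pvA_findSequences, ha2, hlen, hmin]
      have eb : pvB_runs minL maxL offsets
          = (offsets.foldl (pvB_scanStep minL maxL) ([], none)).1 := by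
        simp [pvB_runs, hb2, hmin]
      rw [ea, eb]; exact ⟨h1, h2⟩

-- ---- stable reverse sort = concatenation of length groups in decreasing length order ----

-- structural unfolding of PySem.List.insertBy (definitional)
theorem pvInsertBy_nil {α : Type} (bef : α → α → Bool) (x : α) :
    PySem.List.insertBy bef x [] = [x] := rfl

theorem pvInsertBy_cons {α : Type} (bef : α → α → Bool) (x y : α) (ys : List α) :
    PySem.List.insertBy bef x (y :: ys)
      = if bef x y = true then x :: y :: ys else y :: PySem.List.insertBy bef x ys := rfl

theorem pvInsertBy_append_of_forall_not {α : Type} (bef : α → α → Bool) (x : α)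
    (g t : List α) (h : ∀ y ∈ g, bef x y = false) :
    PySem.List.insertBy bef x (g ++ t) = g ++ PySem.List.insertBy bef x t := by
  induction g with
  | nil => rfl
  | cons y g ih =>
    have hy := h y (List.mem_cons_self ..)
    rw [List.cons_append, pvInsertBy_cons, if_neg (by simp [hy]),
      ih (fun z hz => h z (List.mem_cons_of_mem _ hz)), List.cons_append]

theorem pvInsertBy_perm {α : Type} (bef : α → α → Bool) (x : α) (ys : List α) :
    (PySem.List.insertBy bef x ys).Perm (x :: ys) := by
  induction ys with
  | nil => exact List.Perm.refl _
  | cons y ys ih =>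
    rw [pvInsertBy_cons]
    by_cases hb : bef x y = true
    · rw [if_pos hb]
    · rw [if_neg hb]
      exact (ih.cons y).trans (List.Perm.swap x y ys)

theorem pvInsertBy_pairwise_gt (k : Int) (Ls : List Int) (hd : Ls.Pairwise (· > ·))
    (hk : k ∉ Ls) :
    (PySem.List.insertBy (fun a b => decide (b < a)) k Ls).Pairwise (· > ·) := by
  induction Ls with
  | nil => exact List.pairwise_singleton _ _
  | cons L Ls ih =>
    obtain ⟨hL, hLs⟩ := List.pairwise_cons.1 hd
    rw [pvInsertBy_cons]
    by_cases hb : (decide (L < k)) = true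
    · rw [if_pos hb]
      have hLk : L < k := of_decide_eq_true hb
      refine List.pairwise_cons.2 ⟨?_, hd⟩
      intro z hz
      rcases List.mem_cons.1 hz with rfl | hz
      · exact hLk
      · exact lt_trans (hL z hz) hLk
    · rw [if_neg hb]
      have hkL : k < L := by
        have h1 : ¬L < k := by simpa using hb
        have h2 : k ≠ L := fun hh => hk (hh ▸ List.mem_cons_self ..)
        omega
      refine List.pairwise_cons.2
        ⟨?_, ih hLs (fun hmem => hk (List.mem_cons_of_mem _ hmem))⟩
      intro z hz
      rcases (PySem.List.mem_insertBy _ _ _ _).1 hz with rfl | hz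
      · exact hkL
      · exact hL z hz

-- inserting an element into a group-concatenated list appends it to its length group
theorem pvInsertBy_flatMap {α : Type} (key : α → Int) (x : α) (Ls : List Int)
    (g : Int → List α) (hd : Ls.Pairwise (· > ·))
    (hkey : ∀ L ∈ Ls, ∀ r ∈ g L, key r = L) (hne : ∀ L ∈ Ls, g L ≠ [])
    (hout : key x ∉ Ls → g (key x) = []) :
    PySem.List.insertBy (fun a b => decide (key b < key a)) x (Ls.flatMap g)
      = (if key x ∈ Ls then Ls else PySem.List.insertBy (fun a b => decide (b < a)) (key x) Ls).flatMap
          (fun L => g L ++ if key x = L then [x] else []) := by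
  induction Ls with
  | nil =>
    rw [if_neg List.not_mem_nil]
    show [x] = ([key x].flatMap fun L => g L ++ if key x = L then [x] else [])
    simp [hout List.not_mem_nil]
  | cons L Ls ih =>
    obtain ⟨hLgt, hdtl⟩ := List.pairwise_cons.1 hd
    have hLnotmem : L ∉ Ls := fun hm => lt_irrefl L (hLgt L hm)
    have hgL := hne L (List.mem_cons_self ..)
    obtain ⟨y, g', hy⟩ := List.exists_cons_of_ne_nil hgL
    have hkeyy : key y = L :=
      hkey L (List.mem_cons_self ..) y (by rw [hy]; exact List.mem_cons_self ..)
    have hkey' : ∀ M ∈ Ls, ∀ r ∈ g M, key r = M :=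
      fun M hM => hkey M (List.mem_cons_of_mem _ hM)
    have hne' : ∀ M ∈ Ls, g M ≠ [] := fun M hM => hne M (List.mem_cons_of_mem _ hM)
    rcases lt_trichotomy (key x) L with hlt | heq | hgt
    · have hknotL : key x ≠ L := ne_of_lt hlt
      have hout' : key x ∉ Ls → g (key x) = [] := fun hm => hout (by simp [hknotL, hm])
      have hskip : ∀ z ∈ g L, (fun a b => decide (key b < key a)) x z = false := by
        intro z hz
        have hkz := hkey L (List.mem_cons_self ..) z hz
        simp only [decide_eq_false_iff_not, hkz]
        omega
      rw [List.flatMap_cons, pvInsertBy_append_of_forall_not _ _ _ _ hskip,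
        ih hdtl hkey' hne' hout']
      by_cases hmem : key x ∈ Ls
      · rw [if_pos hmem, if_pos (List.mem_cons_of_mem _ hmem), List.flatMap_cons]
        simp [hknotL]
      · rw [if_neg hmem, if_neg (by simp [hknotL, hmem]), pvInsertBy_cons,
          if_neg (by simp only [decide_eq_true_eq]; omega), List.flatMap_cons]
        simp [hknotL]
    · have hskip : ∀ z ∈ g L, (fun a b => decide (key b < key a)) x z = false := by
        intro z hz
        have hkz := hkey L (List.mem_cons_self ..) z hz
        simp only [decide_eq_false_iff_not, hkz, heq]
        omega
      have hmem : key x ∈ L :: Ls := by rw [heq]; exact List.mem_cons_self ..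
      have htail : Ls.flatMap (fun M => g M ++ if key x = M then [x] else []) = Ls.flatMap g := by
        refine List.flatMap_congr ?_
        intro M hM
        have hne2 : key x ≠ M := by have := hLgt M hM; omega
        simp [hne2]
      rw [List.flatMap_cons, pvInsertBy_append_of_forall_not _ _ _ _ hskip, if_pos hmem,
        List.flatMap_cons, htail]
      cases Ls with
      | nil => simp [heq, pvInsertBy_nil]
      | cons M Ls' =>
        have hM : M ∈ M :: Ls' := List.mem_cons_self ..
        have hgM := hne M (List.mem_cons_of_mem _ hM)
        obtain ⟨z, gM', hz⟩ := List.exists_cons_of_ne_nil hgM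
        have hkz : key z = M :=
          hkey M (List.mem_cons_of_mem _ hM) z (by rw [hz]; exact List.mem_cons_self ..)
        have hflat2 : List.flatMap g (M :: Ls') = z :: (gM' ++ List.flatMap g Ls') := by
          rw [List.flatMap_cons, hz, List.cons_append]
        rw [hflat2, pvInsertBy_cons,
          if_pos (by simp only [decide_eq_true_eq, hkz, heq]; exact hLgt M hM)]
        simp [heq]
    · have hb : (fun a b => decide (key b < key a)) x y = true := by
        simp only [decide_eq_true_eq, hkeyy]; exact hgt
      have hknotmem : key x ∉ L :: Ls := by
        intro hm
        rcases List.mem_cons.1 hm with hh | hh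
        · omega
        · have := hLgt _ hh; omega
      have hknotL : key x ≠ L := ne_of_gt hgt
      have htail : Ls.flatMap (fun M => g M ++ if key x = M then [x] else []) = Ls.flatMap g := by
        refine List.flatMap_congr ?_
        intro M hM
        have hne2 : key x ≠ M := by have := hLgt M hM; omega
        simp [hne2]
      rw [List.flatMap_cons, hy, List.cons_append, pvInsertBy_cons, if_pos hb,
        if_neg hknotmem, pvInsertBy_cons,
        if_pos (by simp only [decide_eq_true_eq]; exact hgt),
        List.flatMap_cons, List.flatMap_cons, htail]
      simp [hout hknotmem, hknotL, hy]

-- Python's stable sorted(xs, key, reverse=True) is the groups of equal keys, concatenated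
-- in decreasing key order
theorem pvSorted_rev_flatMap {α : Type} (key : α → Int) (xs : List α) :
    PySem.List.sorted xs key true
      = (PySem.List.sorted (PySem.Set.ofList (xs.map key)) (fun x => x) true).flatMap
          (fun L => xs.filter (fun r => key r = L)) := by
  induction xs using List.reverseRecOn with
  | nil => rfl
  | append_singleton xs x ih =>
    have hnd : (PySem.List.sorted (PySem.Set.ofList (xs.map key)) (fun v => v) true).Nodup :=
      (PySem.List.sorted_perm (PySem.Set.ofList (xs.map key)) (fun v => v) true).nodup_iff.mpr
        (PySem.Set.nodup_ofList _)
    have hLs_gt :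
        (PySem.List.sorted (PySem.Set.ofList (xs.map key)) (fun v => v) true).Pairwise (· > ·) := by
      have hge := PySem.List.sorted_pairwise_rev (PySem.Set.ofList (xs.map key)) (fun v => v)
      exact (hge.and hnd).imp (fun h => lt_of_le_of_ne h.1 (Ne.symm h.2))
    have hmemLs : ∀ L, L ∈ PySem.List.sorted (PySem.Set.ofList (xs.map key)) (fun v => v) true
        ↔ L ∈ xs.map key := by
      intro L
      rw [PySem.List.mem_sorted, PySem.Set.mem_ofList]
    have hstep := pvInsertBy_flatMap key x
      (PySem.List.sorted (PySem.Set.ofList (xs.map key)) (fun v => v) true)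
      (fun L => xs.filter (fun r => key r = L)) hLs_gt
      (by
        intro L _ r hr
        have := List.of_mem_filter hr
        simpa using this)
      (by
        intro L hL
        obtain ⟨r, hr, hkr⟩ := List.mem_map.1 ((hmemLs L).1 hL)
        exact List.ne_nil_of_mem (List.mem_filter.2 ⟨hr, by simp [hkr]⟩))
      (by
        intro hnm
        refine List.filter_eq_nil_iff.2 ?_
        intro r hr
        simp only [decide_eq_true_eq]
        intro hkr
        exact hnm ((hmemLs _).2 (hkr ▸ List.mem_map_of_mem hr)))
    rw [PySem.List.sorted_rev_eq_foldl_insertBy, List.foldl_append, List.foldl_cons,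
      List.foldl_nil, ← PySem.List.sorted_rev_eq_foldl_insertBy, ih, hstep]
    have hofl : PySem.Set.ofList ((xs ++ [x]).map key)
        = PySem.Set.add (PySem.Set.ofList (xs.map key)) (key x) := by
      rw [List.map_append]
      simp [PySem.Set.ofList_eq_foldl]
    have hgrp : ∀ L, (xs ++ [x]).filter (fun r => key r = L)
        = xs.filter (fun r => key r = L) ++ if key x = L then [x] else [] := by
      intro L
      rw [List.filter_append]
      by_cases hL : key x = L
      · simp [hL]
      · simp [hL]
    by_cases hmem : key x ∈ PySem.List.sorted (PySem.Set.ofList (xs.map key)) (fun v => v) true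
    · have hmemS : key x ∈ PySem.Set.ofList (xs.map key) := (PySem.List.mem_sorted _ _ _ _).1 hmem
      have hadd : PySem.Set.add (PySem.Set.ofList (xs.map key)) (key x)
          = PySem.Set.ofList (xs.map key) := by simp [PySem.Set.add, hmemS]
      rw [if_pos hmem, hofl, hadd]
      exact (List.flatMap_congr (fun L _ => (hgrp L).symm))
    · have hmemS : key x ∉ PySem.Set.ofList (xs.map key) := fun hc =>
        hmem ((PySem.List.mem_sorted _ _ _ _).2 hc)
      have hadd : PySem.Set.add (PySem.Set.ofList (xs.map key)) (key x)
          = PySem.Set.ofList (xs.map key) ++ [key x] := by simp [PySem.Set.add, hmemS]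
      have hsorted' : PySem.List.sorted (PySem.Set.ofList (xs.map key) ++ [key x])
            (fun v => v) true
          = PySem.List.insertBy (fun a b => decide (b < a)) (key x)
              (PySem.List.sorted (PySem.Set.ofList (xs.map key)) (fun v => v) true) := by
        refine PySem.List.sorted_rev_eq_of_perm_of_pairwise_gt _ _ _ ?_ ?_
        · exact (pvInsertBy_perm _ _ _).trans
            (((PySem.List.sorted_perm _ _ _).cons (key x)).trans
              (List.perm_append_singleton _ _).symm)
        · exact pvInsertBy_pairwise_gt _ _ hLs_gt hmem
      rw [if_neg hmem, hofl, hadd, hsorted']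
      exact (List.flatMap_congr (fun L _ => (hgrp L).symm))

-- ---- the emission pass over the grouped runs ----

def pvFtr : List String := ["\tdex", "\tbpl -", ""]

def pvClose (p : List String × Option Int) : List String :=
  match p.2 with
  | some _ => p.1 ++ pvFtr
  | none => p.1

def pvGroupLines (base : Int) (grp : Int → List (Int × Int)) (L : Int) : List String :=
  ["\tldx #" ++ PySem.Int.toStr L ++ " - 1", "-"]
    ++ (grp L).map (fun r => "\tsta $" ++ pyHexTail (base + r.1) ++ ",x") ++ pvFtr

theorem pvEmit_same_group (base L : Int) (g : List (Int × Int)) (hg : ∀ r ∈ g, r.2 = L)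
    (out : List String) :
    g.foldl (pvB_emitStep base) (out, some L)
      = (out ++ g.map (fun r => "\tsta $" ++ pyHexTail (base + r.1) ++ ",x"), some L) := by
  induction g generalizing out with
  | nil => simp
  | cons r g ih =>
    have hr : r.2 = L := hg r (List.mem_cons_self ..)
    have estep : pvB_emitStep base (out, some L) r
        = (out ++ ["\tsta $" ++ pyHexTail (base + r.1) ++ ",x"], some L) := by
      simp [pvB_emitStep, hr]
    rw [List.foldl_cons, estep, ih (fun z hz => hg z (List.mem_cons_of_mem _ hz))]
    simp

theorem pvEmit_groups (base : Int) (Ls : List Int) (grp : Int → List (Int × Int))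
    (hkey : ∀ L ∈ Ls, ∀ r ∈ grp L, r.2 = L) (hne : ∀ L ∈ Ls, grp L ≠ [])
    (hnd : Ls.Pairwise (· ≠ ·)) (out : List String) (prev : Option Int)
    (hprev : ∀ L ∈ Ls, prev ≠ some L) :
    pvClose ((Ls.flatMap grp).foldl (pvB_emitStep base) (out, prev))
      = pvClose (out, prev) ++ Ls.flatMap (pvGroupLines base grp) := by
  induction Ls generalizing out prev with
  | nil => simp [pvClose]
  | cons L Ls ih =>
    obtain ⟨hLne, hnd'⟩ := List.pairwise_cons.1 hnd
    obtain ⟨r, g', hgr⟩ := List.exists_cons_of_ne_nil (hne L (List.mem_cons_self ..))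
    have hrL : r.2 = L :=
      hkey L (List.mem_cons_self ..) r (by rw [hgr]; exact List.mem_cons_self ..)
    have hg' : ∀ z ∈ g', z.2 = L := fun z hz =>
      hkey L (List.mem_cons_self ..) z (by rw [hgr]; exact List.mem_cons_of_mem _ hz)
    have hprevL : prev ≠ some L := hprev L (List.mem_cons_self ..)
    have estep : pvB_emitStep base (out, prev) r
        = (pvClose (out, prev) ++ ["\tldx #" ++ PySem.Int.toStr L ++ " - 1"] ++ ["-"]
            ++ ["\tsta $" ++ pyHexTail (base + r.1) ++ ",x"], some L) := by
      simp only [pvB_emitStep]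
      rw [if_pos (by rw [hrL]; exact hprevL), hrL]
      cases prev with
      | none => simp [pvClose]
      | some q => simp [pvClose, pvFtr]
    rw [List.flatMap_cons, List.foldl_append, hgr, List.foldl_cons, estep,
      pvEmit_same_group base L g' hg' _,
      ih (fun M hM => hkey M (List.mem_cons_of_mem _ hM))
        (fun M hM => hne M (List.mem_cons_of_mem _ hM)) hnd' _ (some L)
        (fun M hM => by simpa using hLne M hM)]
    simp [pvClose, pvGroupLines, pvFtr, hgr]

-- ---- putting one block together ----

-- A's grouping loop body is a Dict.modify
theorem pvGroupStep_eq_modify (d : PySem.Dict Int (List (List Int))) (q : List Int) :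
    pvA_groupStep d q = d.modify ((q.length : Int)) [] (· ++ [q]) := by
  unfold pvA_groupStep PySem.Dict.modify
  by_cases hc : d.contains ((q.length : Int))
  · simp only [hc, if_true]
  · simp only [hc, Bool.false_eq_true, if_false]
    have h0 : d.getD ((q.length : Int)) [] = [] :=
      PySem.Dict.getD_of_not_contains d [] (by simpa using hc)
    simp [h0, PySem.Dict.insert_insert_self]

theorem pvBlock_eq (minL maxL base idx : Int) (offsets : List Int) (res : List String) :
    pvA_block minL maxL base idx offsets res = pvB_block minL maxL base idx offsets res := by
  obtain ⟨hseq, hrun1⟩ := pvSequences_eq minL maxL offsets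
  dsimp only [pvA_block, pvB_block]
  set seqs := pvA_findSequences minL maxL offsets with hseqs_def
  set runs := pvB_runs minL maxL offsets with hruns_def
  set res0 := res ++ ["fill_color_step" ++ PySem.Int.toStr idx] ++ ["\tlda fill_color"] with hres0_def
  set groups := seqs.foldl pvA_groupStep PySem.Dict.empty with hgroups_def
  have hmod : groups = seqs.foldl
      (fun d q => d.modify ((q.length : Int)) [] (· ++ [q])) PySem.Dict.empty := by
    rw [hgroups_def]
    exact PySem.List.foldl_congr_mem _ _ _ _ (fun d q _ => pvGroupStep_eq_modify d q)
  have hlenmap : seqs.map (fun q => (q.length : Int)) = runs.map (fun r => r.2) := by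
    rw [hseq, List.map_map]
    refine List.map_congr_left ?_
    intro r hr
    simp only [Function.comp_apply]
    obtain ⟨s, l⟩ := r
    exact pvRng_length s l (hrun1 _ hr)
  have hkeys : groups.keys = PySem.Set.ofList (runs.map (fun r => r.2)) := by
    rw [hmod, PySem.Dict.keys_foldl_modify_key seqs (fun q => ((q.length : Int))) []
      (fun _ q => (· ++ [q])) PySem.Dict.empty, hlenmap]
    simp [PySem.Dict.keys_empty, PySem.Set.update, PySem.Set.ofList_eq_foldl]
  rw [hkeys]
  set Ls := PySem.List.sorted (PySem.Set.ofList (runs.map (fun r => r.2))) (fun x => x) true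
    with hLs_def
  set grp := fun L => runs.filter (fun r => decide (r.2 = L)) with hgrp_def
  have hgetD : ∀ L, groups.getD L [] = (grp L).map pvRng := by
    intro L
    have h0 := PySem.Dict.getD_foldl_modify_append
      (seqs.map fun q => (((q.length : Int)), q)) PySem.Dict.empty L
    rw [List.foldl_map] at h0
    dsimp only at h0
    rw [hmod, h0, PySem.Dict.getD_empty, List.nil_append, List.filter_map, List.map_map]
    have h1 : seqs.filter ((fun p => p.1 == L) ∘ fun q => (((q.length : Int)), q))
        = seqs.filter (fun q => ((q.length : Int)) == L) := by
      refine List.filter_congr ?_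
      intro q _
      rfl
    have h2 : (List.map ((fun p => p.2) ∘ fun q => (((q.length : Int)), q))
          (seqs.filter ((fun p => p.1 == L) ∘ fun q => (((q.length : Int)), q))))
        = seqs.filter (fun q => ((q.length : Int)) == L) := by
      have hid : ((fun (p : Int × List Int) => p.2) ∘ fun q => (((q.length : Int)), q)) = id := by
        funext q
        rfl
      rw [h1, hid, List.map_id]
    rw [h2, hseq, List.filter_map]
    refine congrArg _ (List.filter_congr ?_)
    intro r hr
    have hr1 : 1 ≤ r.2 := hrun1 r hr
    obtain ⟨s, l⟩ := r
    simp only [Function.comp_apply]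
    rw [pvRng_length s l hr1]
    by_cases h : l = L <;> simp [h]
  have hsta : ∀ L, ((grp L).map pvRng).map (pvA_sta base)
      = (grp L).map (fun r => "\tsta $" ++ pyHexTail (base + r.1) ++ ",x") := by
    intro L
    rw [List.map_map]
    refine List.map_congr_left ?_
    intro r hr
    have hr1 : 1 ≤ r.2 := hrun1 r (List.mem_of_mem_filter hr)
    obtain ⟨s, l⟩ := r
    simp only [Function.comp_apply, pvA_sta]
    rw [pvRng_head s l hr1]
  have hAfold : Ls.foldl (fun r length =>
      ((groups.getD length []).foldl (fun r seq => r ++ [pvA_sta base seq])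
        (r ++ ["\tldx #" ++ PySem.Int.toStr length ++ " - 1"] ++ ["-"]))
      ++ ["\tdex"] ++ ["\tbpl -"] ++ [""]) res0
      = res0 ++ Ls.flatMap (pvGroupLines base grp) := by
    have hb : ∀ (acc : List String) (L : Int), L ∈ Ls →
        (((groups.getD L []).foldl (fun r seq => r ++ [pvA_sta base seq])
          (acc ++ ["\tldx #" ++ PySem.Int.toStr L ++ " - 1"] ++ ["-"]))
          ++ ["\tdex"] ++ ["\tbpl -"] ++ [""])
        = acc ++ pvGroupLines base grp L := by
      intro acc L _
      rw [PySem.List.foldl_append_singleton_eq_map, hgetD L, hsta L]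
      simp [pvGroupLines, pvFtr]
    rw [PySem.List.foldl_congr_mem _ _
      (fun acc L => acc ++ pvGroupLines base grp L) _ (fun acc L hL => hb acc L hL),
      PySem.List.foldl_append_eq_flatMap]
  rw [hAfold]
  have hord : PySem.List.sorted runs (fun r => r.2) true = Ls.flatMap grp := by
    rw [pvSorted_rev_flatMap (fun r => r.2) runs]
  rw [hord]
  have hclose : ∀ p : List String × Option Int,
      (match p.2 with
       | some _ => p.1 ++ ["\tdex"] ++ ["\tbpl -"] ++ [""]
       | none => p.1) = pvClose p := by
    intro p
    obtain ⟨a, b⟩ := p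
    cases b <;> simp [pvClose, pvFtr]
  rw [hclose ((Ls.flatMap grp).foldl (pvB_emitStep base) (res0, none))]
  have hkgrp : ∀ L ∈ Ls, ∀ r ∈ grp L, r.2 = L := by
    intro L _ r hr
    rw [hgrp_def] at hr
    exact of_decide_eq_true (List.mem_filter.1 hr).2
  have hngrp : ∀ L ∈ Ls, grp L ≠ [] := by
    intro L hL
    have hLm : L ∈ runs.map (fun r => r.2) :=
      (PySem.Set.mem_ofList _ _).1 ((PySem.List.mem_sorted _ _ _ _).1 hL)
    obtain ⟨r, hr, hrL⟩ := List.mem_map.1 hLm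
    exact List.ne_nil_of_mem (List.mem_filter.2 ⟨hr, by simp [hrL]⟩)
  have hdst : Ls.Pairwise (· ≠ ·) :=
    (PySem.List.sorted_perm _ _ _).nodup_iff.mpr (PySem.Set.nodup_ofList _)
  rw [pvEmit_groups base Ls grp hkgrp hngrp hdst res0 none (fun L _ => by simp)]
  have hremA : pvA_remove offsets seqs
      = offsets.filter (fun num => !(runs.any (fun r => decide (r.1 ≤ num ∧ num < r.1 + r.2)))) := by
    unfold pvA_remove
    rw [hseq]
    refine List.filter_congr ?_
    intro n _
    have hiff : (((runs.map pvRng).flatMap (fun s => s)).contains n = true)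
        ↔ (runs.any (fun r => decide (r.1 ≤ n ∧ n < r.1 + r.2)) = true) := by
      simp [List.any_eq_true, pvRng, PySem.List.mem_pyRange_one]
    cases hc : ((runs.map pvRng).flatMap (fun s => s)).contains n with
    | true => rw [hiff.1 hc]
    | false =>
      cases ha : runs.any (fun r => decide (r.1 ≤ n ∧ n < r.1 + r.2)) with
      | true => exact absurd (hiff.2 ha) (by rw [hc]; exact Bool.false_ne_true)
      | false => rfl
  rw [hremA, PySem.List.foldl_append_singleton_eq_map,
    PySem.List.foldl_append_if (fun num => !(runs.any (fun r => decide (r.1 ≤ num ∧ num < r.1 + r.2))))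
      (fun num => "\tsta $" ++ pyHexTail (base + num)) offsets]
  simp [pvClose, List.append_assoc]

-- ===== VERDICT (by name: the statement is the Claim_ definition above) =====
theorem generate_color_fill_code_spec : Claim_equal_generate_color_fill_code := by
  intro fb minL maxL base _
  unfold Spec_generate_color_fill_code
  unfold generate_color_fill_code generate_color_fill_code_alt
  have : ∀ (l : List (Int × List Int)) (res : List String),
      l.foldl (fun res p => pvA_block minL maxL base p.1 p.2 res) res
        = l.foldl (fun res p => pvB_block minL maxL base p.1 p.2 res) res := by
    intro l
    induction l with
    | nil => intro res; rfl
    | cons p t ih => intro res; rw [List.foldl_cons, List.foldl_cons, pvBlock_eq]; exact ih _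
  simp only [this]
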